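-- pv_equiv track=rewrite | github.com/Frikster/EDS_converter | EDS_converter.py | clean_dosage_reason_boundary
-- ===== SOURCE A (Python) =====
-- def clean_dosage_reason_boundary(dosage_reason_boundary):
--     split_boundary_raw = [str.split(x) for x in dosage_reason_boundary]
--     dosage_reason_boundary_cleaned = []
--     for raw_boundary in split_boundary_raw:
--         single_boundary_cleaned = []
--         tacked_on = []
--         end_of_boundary_found = False
--         for elem in raw_boundary:
--             if elem.isdigit() and not end_of_boundary_found:
--                 single_boundary_cleaned = single_boundary_cleaned + [elem]
--             else:
--                 end_of_boundary_found = True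
--                 tacked_on = tacked_on + [elem]
--         dosage_reason_boundary_cleaned = dosage_reason_boundary_cleaned + [(single_boundary_cleaned, tacked_on)]
--     return dosage_reason_boundary_cleaned
-- ===== SOURCE B (Python) =====
-- def clean_dosage_reason_boundary(dosage_reason_boundary):
--     cleaned = []
--     for x in dosage_reason_boundary:
--         tokens = x.split()
--         idx = next((i for i, t in enumerate(tokens) if not t.isdigit()), len(tokens))
--         cleaned.append((tokens[:idx], tokens[idx:]))
--     return cleaned
-- ===== Notes on version B (the rewrite author's own statement) =====
-- stated objective: faster
-- what changed: Replaces the latched flag with two quadratic list-append accumulators by computing the first non-digit token's index and slicing the token list there.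
import Mathlib
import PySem

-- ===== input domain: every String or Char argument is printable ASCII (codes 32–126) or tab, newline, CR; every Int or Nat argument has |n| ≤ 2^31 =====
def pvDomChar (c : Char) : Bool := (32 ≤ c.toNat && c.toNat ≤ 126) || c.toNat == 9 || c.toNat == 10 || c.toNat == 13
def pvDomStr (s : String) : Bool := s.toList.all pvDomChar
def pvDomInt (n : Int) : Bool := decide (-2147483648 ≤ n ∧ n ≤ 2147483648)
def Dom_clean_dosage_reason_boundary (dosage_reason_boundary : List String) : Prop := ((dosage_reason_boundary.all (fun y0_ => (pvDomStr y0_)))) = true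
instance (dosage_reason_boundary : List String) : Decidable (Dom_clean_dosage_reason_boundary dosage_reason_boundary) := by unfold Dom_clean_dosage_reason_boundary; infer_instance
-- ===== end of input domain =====

-- B replaces A's latched-flag loop with two appended accumulators by a find-the-first-non-digit-index-then-slice decomposition (faster: avoids A's quadratic repeated list concatenation; return value identical).
-- ===== PORT A =====
-- inner loop of A: flag + two accumulators, appending one element at a time
def pvLoopA : List String → List String → List String → Bool → List String × List String
  | [], acc, tack, _ => (acc, tack)
  | e :: r, acc, tack, flag =>
    if PySem.Str.strIsdigit e && !flag then pvLoopA r (acc ++ [e]) tack flag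
    else pvLoopA r acc (tack ++ [e]) true

def clean_dosage_reason_boundary (dosage_reason_boundary : List String) : List (List String × List String) :=
  let split_boundary_raw := dosage_reason_boundary.map (fun x => PySem.Str.split₀ x)
  split_boundary_raw.foldl (fun out raw => out ++ [pvLoopA raw [] [] false]) []

-- ===== PORT B =====
def clean_dosage_reason_boundary_alt (dosage_reason_boundary : List String) : List (List String × List String) :=
  dosage_reason_boundary.map (fun x =>
    let tokens := PySem.Str.split₀ x
    let idx := tokens.findIdx (fun t => !PySem.Str.strIsdigit t)
    (tokens.take idx, tokens.drop idx))

-- ===== PRECONDITION & SPEC =====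
def Spec_clean_dosage_reason_boundary (dosage_reason_boundary : List String) (out : List (List String × List String)) : Prop := out = clean_dosage_reason_boundary_alt dosage_reason_boundary
instance (dosage_reason_boundary : List String) (out : List (List String × List String)) : Decidable (Spec_clean_dosage_reason_boundary dosage_reason_boundary out) := by unfold Spec_clean_dosage_reason_boundary; infer_instance

-- ===== CLAIM (what is proved, stated in full; the proofs are below) =====
def Claim_equal_clean_dosage_reason_boundary : Prop := ∀ (dosage_reason_boundary : List String), Dom_clean_dosage_reason_boundary dosage_reason_boundary → Spec_clean_dosage_reason_boundary dosage_reason_boundary (clean_dosage_reason_boundary dosage_reason_boundary)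

-- ===== LEMMAS AND PROOFS =====

-- ===== VERDICT (by name: the statement is the Claim_ definition above) =====
lemma pvLoopA_true (ts : List String) : ∀ acc tack, pvLoopA ts acc tack true = (acc, tack ++ ts) := by
  induction ts with
  | nil => intro acc tack; simp [pvLoopA]
  | cons e r ih => intro acc tack; simp [pvLoopA, ih]

lemma pvLoopA_false (ts : List String) : ∀ acc, pvLoopA ts acc [] false =
    (acc ++ ts.take (ts.findIdx (fun t => !PySem.Str.strIsdigit t)),
     ts.drop (ts.findIdx (fun t => !PySem.Str.strIsdigit t))) := by
  induction ts with
  | nil => intro acc; simp [pvLoopA]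
  | cons e r ih =>
    intro acc
    by_cases h : PySem.Chars.strIsdigit e.toList = true
    · simp [pvLoopA, h, ih, List.findIdx_cons]
    · simp only [Bool.not_eq_true] at h
      simp [pvLoopA, h, pvLoopA_true, List.findIdx_cons]

lemma pvFoldlMap {α β : Type} (f : α → β) (l : List α) : ∀ (acc : List β),
    l.foldl (fun out raw => out ++ [f raw]) acc = acc ++ l.map f := by
  induction l with
  | nil => intro acc; simp
  | cons x r ih => intro acc; simp [ih]

theorem clean_dosage_reason_boundary_spec : Claim_equal_clean_dosage_reason_boundary := by
  intro l _
  unfold Spec_clean_dosage_reason_boundary clean_dosage_reason_boundary clean_dosage_reason_boundary_alt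
  rw [pvFoldlMap]
  simp [pvLoopA_false, Function.comp]
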